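-- pv_equiv track=rewrite | github.com/hamzagamiet/csv_data_sorting | file_sorting.py | get_invoice_data
-- ===== SOURCE A (Python) =====
-- def get_invoice_data(data):
--     context = {
--         "invoice_no": "",
--         "dates": "",
--         "account_no": "",
--         "resident_no": "",
--         "source": "",
--         "details": "",
--         "transaction_amount": "",
--     }
--
--     for key in data:
--         if "invoice_no" in key:
--             context["invoice_no"] = data[key]
--         if "date" in key:
--             context["dates"] = data[key]
--         if "account_no" in key:
--             context["account_no"] = data[key]
--         if "resident_no" in key:
--             context["resident_no"] = data[key]
--         if "source" in key:
--             context["source"] = data[key]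
--         if "details" in key:
--             context["details"] = data[key]
--         if "transaction_amount" in key:
--             context["transaction_amount"] = data[key]
--
--     return context
-- ===== SOURCE B (Python) =====
-- def get_invoice_data(data):
--     fields = [
--         ("invoice_no", "invoice_no"),
--         ("date", "dates"),
--         ("account_no", "account_no"),
--         ("resident_no", "resident_no"),
--         ("source", "source"),
--         ("details", "details"),
--         ("transaction_amount", "transaction_amount"),
--     ]
--     context = {}
--     for sub, field in fields:
--         last = ""
--         for key, value in data.items():
--             if sub in key:
--                 last = value
--         context[field] = last
--     return context
-- ===== Notes on version B (the rewrite author's own statement) =====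
-- stated objective: alternative
-- what changed: Inverts the loop nesting: instead of one pass over the dict keys updating seven context fields per key, B scans the data once per field, keeping the last value whose key contains that field's substring.
import Mathlib
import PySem

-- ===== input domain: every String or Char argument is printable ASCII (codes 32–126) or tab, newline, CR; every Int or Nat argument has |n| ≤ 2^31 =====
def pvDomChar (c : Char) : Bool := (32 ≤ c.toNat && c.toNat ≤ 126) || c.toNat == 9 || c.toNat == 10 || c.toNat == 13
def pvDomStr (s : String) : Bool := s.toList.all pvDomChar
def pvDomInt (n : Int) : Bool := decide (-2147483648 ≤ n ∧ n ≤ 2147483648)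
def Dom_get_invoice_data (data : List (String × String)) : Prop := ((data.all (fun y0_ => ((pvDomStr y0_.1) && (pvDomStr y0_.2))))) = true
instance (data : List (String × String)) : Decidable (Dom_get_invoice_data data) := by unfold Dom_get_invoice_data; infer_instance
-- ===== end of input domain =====

-- ===== PORT A =====
-- A: one pass over the keys; a block of seven substring checks updates the context dict per key.
def pvStepA (ctx : PySem.Dict String String) (kv : String × String) : PySem.Dict String String :=
  let ctx := if PySem.Str.isIn "invoice_no" kv.1 then ctx.insert "invoice_no" kv.2 else ctx
  let ctx := if PySem.Str.isIn "date" kv.1 then ctx.insert "dates" kv.2 else ctx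
  let ctx := if PySem.Str.isIn "account_no" kv.1 then ctx.insert "account_no" kv.2 else ctx
  let ctx := if PySem.Str.isIn "resident_no" kv.1 then ctx.insert "resident_no" kv.2 else ctx
  let ctx := if PySem.Str.isIn "source" kv.1 then ctx.insert "source" kv.2 else ctx
  let ctx := if PySem.Str.isIn "details" kv.1 then ctx.insert "details" kv.2 else ctx
  let ctx := if PySem.Str.isIn "transaction_amount" kv.1 then ctx.insert "transaction_amount" kv.2 else ctx
  ctx

def get_invoice_data (data : List (String × String)) : List (String × String) :=
  let context : PySem.Dict String String := PySem.Dict.ofList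
    [("invoice_no", ""), ("dates", ""), ("account_no", ""), ("resident_no", ""),
     ("source", ""), ("details", ""), ("transaction_amount", "")]
  (data.foldl pvStepA context).items

-- ===== PORT B =====
-- B: inverted nesting — one scan of the data per field, keeping the LAST matching key's value ("" if none).
def pvLast (sub : String) (data : List (String × String)) (last : String) : String :=
  data.foldl (fun last kv => if PySem.Str.isIn sub kv.1 then kv.2 else last) last

def get_invoice_data_alt (data : List (String × String)) : List (String × String) :=
  ([("invoice_no", "invoice_no"), ("date", "dates"), ("account_no", "account_no"),
    ("resident_no", "resident_no"), ("source", "source"), ("details", "details"),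
    ("transaction_amount", "transaction_amount")] : List (String × String)).map
    (fun sf => (sf.2, pvLast sf.1 data ""))

-- ===== PRECONDITION & SPEC =====
def Spec_get_invoice_data (data : List (String × String)) (out : List (String × String)) : Prop := out = get_invoice_data_alt data
instance (data : List (String × String)) (out : List (String × String)) : Decidable (Spec_get_invoice_data data out) := by unfold Spec_get_invoice_data; infer_instance

-- ===== CLAIM (what is proved, stated in full; the proofs are below) =====
def Claim_equal_get_invoice_data : Prop := ∀ (data : List (String × String)), Dom_get_invoice_data data → Spec_get_invoice_data data (get_invoice_data data)

-- ===== LEMMAS AND PROOFS =====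
def pvCtx7 (a b c d e f g : String) : PySem.Dict String String :=
  PySem.Dict.mk [("invoice_no", a), ("dates", b), ("account_no", c), ("resident_no", d),
                 ("source", e), ("details", f), ("transaction_amount", g)]

set_option maxHeartbeats 2000000 in
theorem pvStepA_ctx7 (a b c d e f g : String) (kv : String × String) :
    pvStepA (pvCtx7 a b c d e f g) kv =
    pvCtx7 (if PySem.Str.isIn "invoice_no" kv.1 then kv.2 else a)
           (if PySem.Str.isIn "date" kv.1 then kv.2 else b)
           (if PySem.Str.isIn "account_no" kv.1 then kv.2 else c)
           (if PySem.Str.isIn "resident_no" kv.1 then kv.2 else d)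
           (if PySem.Str.isIn "source" kv.1 then kv.2 else e)
           (if PySem.Str.isIn "details" kv.1 then kv.2 else f)
           (if PySem.Str.isIn "transaction_amount" kv.1 then kv.2 else g) := by
  simp only [pvStepA]
  split_ifs <;> rfl

theorem pvFoldA (data : List (String × String)) :
    ∀ (a b c d e f g : String),
      data.foldl pvStepA (pvCtx7 a b c d e f g) =
      pvCtx7 (pvLast "invoice_no" data a) (pvLast "date" data b) (pvLast "account_no" data c)
             (pvLast "resident_no" data d) (pvLast "source" data e) (pvLast "details" data f)
             (pvLast "transaction_amount" data g) := by
  induction data with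
  | nil => intro a b c d e f g; rfl
  | cons kv t ih =>
    intro a b c d e f g
    simp only [List.foldl_cons, pvStepA_ctx7, ih]
    rfl

-- ===== VERDICT (by name: the statement is the Claim_ definition above) =====
theorem get_invoice_data_spec : Claim_equal_get_invoice_data := by
  intro data _
  unfold Spec_get_invoice_data get_invoice_data get_invoice_data_alt
  show (data.foldl pvStepA (pvCtx7 "" "" "" "" "" "" "")).items = _
  rw [pvFoldA]
  rfl
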